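-- pv_equiv track=rewrite | github.com/CyberPlugger/reincarnation | main/__init__.py | patch_syntax
-- ===== SOURCE A (Python) =====
-- def patch_syntax(code_string):
--     transformations = {
--         "unicode(": "str(",
--         "xrange(": "range(",
--         "itervalues(": "values("
--     }
--     for old, new in transformations.items():
--         code_string = code_string.replace(old, new)
--     return code_string
-- ===== SOURCE B (Python) =====
-- def patch_syntax(code_string):
--     # Single left-to-right scan with a substitution table instead of three
--     # sequential full-string replace passes (the patterns are disjoint, so
--     # the result is identical).
--     table = (("unicode(", "str("), ("xrange(", "range("), ("itervalues(", "values("))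
--     out = []
--     i = 0
--     n = len(code_string)
--     while i < n:
--         for old, new in table:
--             if code_string.startswith(old, i):
--                 out.append(new)
--                 i += len(old)
--                 break
--         else:
--             out.append(code_string[i])
--             i += 1
--     return "".join(out)
-- ===== Notes on version B (the rewrite author's own statement) =====
-- stated objective: alternative
-- what changed: Replaced three sequential full-string str.replace passes by one left-to-right scan with a substitution table (the three patterns are mutually non-overlapping and the replacements cannot re-create matches, so the single pass yields the identical string).
import Mathlib
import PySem

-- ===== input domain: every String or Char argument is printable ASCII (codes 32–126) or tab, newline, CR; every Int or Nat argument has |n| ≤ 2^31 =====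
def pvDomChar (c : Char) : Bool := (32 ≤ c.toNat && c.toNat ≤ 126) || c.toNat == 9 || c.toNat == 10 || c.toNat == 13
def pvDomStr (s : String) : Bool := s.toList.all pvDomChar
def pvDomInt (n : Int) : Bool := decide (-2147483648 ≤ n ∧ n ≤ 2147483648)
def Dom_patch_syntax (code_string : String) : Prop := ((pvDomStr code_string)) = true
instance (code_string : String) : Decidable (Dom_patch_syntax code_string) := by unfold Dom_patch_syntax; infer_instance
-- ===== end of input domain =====

-- B replaces A's three sequential full-string replace passes by one left-to-right
-- scan with a substitution table; the patterns are disjoint so the result is equal.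

-- ===== PORT A =====
def patch_syntax (code_string : String) : String :=
  -- the dict's three (old, new) pairs applied with str.replace, in insertion order
  let s1 := PySem.Str.replace code_string "unicode(" "str("
  let s2 := PySem.Str.replace s1 "xrange(" "range("
  PySem.Str.replace s2 "itervalues(" "values("

-- ===== PORT B =====
-- B's scan: at each position try the three table entries in order (startswith);
-- on a hit emit the replacement and jump past the pattern, else copy one char.
def pvGoB : List Char → List Char
  | [] => []
  | c :: t =>
    if "unicode(".toList.isPrefixOf (c :: t) then "str(".toList ++ pvGoB (t.drop 7)
    else if "xrange(".toList.isPrefixOf (c :: t) then "range(".toList ++ pvGoB (t.drop 6)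
    else if "itervalues(".toList.isPrefixOf (c :: t) then "values(".toList ++ pvGoB (t.drop 10)
    else c :: pvGoB t
termination_by l => l.length
decreasing_by all_goals (simp [List.length_drop]; try omega)

def patch_syntax_alt (code_string : String) : String :=
  String.ofList (pvGoB code_string.toList)

-- ===== PRECONDITION & SPEC =====
def Spec_patch_syntax (code_string : String) (out : String) : Prop := out = patch_syntax_alt code_string
instance (code_string : String) (out : String) : Decidable (Spec_patch_syntax code_string out) := by unfold Spec_patch_syntax; infer_instance

-- ===== CLAIM (what is proved, stated in full; the proofs are below) =====
def Claim_equal_patch_syntax : Prop := ∀ (code_string : String), Dom_patch_syntax code_string → Spec_patch_syntax code_string (patch_syntax code_string)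

-- ===== LEMMAS AND PROOFS =====

lemma pv_toList_ofList (l : List Char) : (String.ofList l).toList = l := by simp

-- structural reformulation of PySem.Chars.replace (for old ≠ [])
def rep1 (old new : List Char) : List Char → List Char
  | [] => []
  | c :: t =>
    if old.isPrefixOf (c :: t) then new ++ rep1 old new (t.drop (old.length - 1))
    else c :: rep1 old new t
termination_by l => l.length
decreasing_by all_goals (simp [List.length_drop]; try omega)

-- q and r disagree before either ends
def pvMismatch (q r : List Char) : Prop := (!(q.isPrefixOf r) && !(r.isPrefixOf q)) = true

lemma mismatch_not_prefix {q r : List Char} (h : pvMismatch q r) (w : List Char) :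
    q.isPrefixOf (r ++ w) = false := by
  unfold pvMismatch at h
  simp only [Bool.and_eq_true, Bool.not_eq_true'] at h
  cases hb : q.isPrefixOf (r ++ w) with
  | false => rfl
  | true =>
    exfalso
    have hq : q <+: r ++ w := List.isPrefixOf_iff_prefix.mp hb
    have hr : r <+: r ++ w := List.prefix_append r w
    rcases List.prefix_or_prefix_of_prefix hq hr with h1 | h1
    · exact absurd (List.isPrefixOf_iff_prefix.mpr h1) (by simp [h.1])
    · exact absurd (List.isPrefixOf_iff_prefix.mpr h1) (by simp [h.2])

lemma go_eq_rep1 (old new : List Char) (hold : old ≠ []) :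
    ∀ fuel l acc, l.length ≤ fuel →
      PySem.Chars.replace.go old new fuel l acc = acc.reverse ++ rep1 old new l := by
  intro fuel
  induction fuel with
  | zero =>
    intro l acc hl
    have : l = [] := List.eq_nil_of_length_eq_zero (Nat.le_zero.mp hl)
    subst this
    simp [PySem.Chars.replace.go, rep1]
  | succ n ih =>
    intro l acc hl
    cases l with
    | nil => simp [PySem.Chars.replace.go, rep1]
    | cons c t =>
      rw [PySem.Chars.replace.go]
      by_cases hp : old.isPrefixOf (c :: t) = true
      · rw [if_pos hp]
        obtain ⟨m, hm⟩ : ∃ m, old.length = m + 1 := by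
          cases old with
          | nil => exact absurd rfl hold
          | cons a b => exact ⟨b.length, by simp⟩
        have hd : List.drop old.length (c :: t) = t.drop (old.length - 1) := by
          rw [hm]; simp
        have hlen : (List.drop old.length (c :: t)).length ≤ n := by
          simp at hl ⊢
          omega
        rw [ih _ _ hlen, hd, rep1, if_pos hp]
        simp
      · rw [if_neg hp]
        have hlen : t.length ≤ n := by simp at hl; omega
        rw [ih _ _ hlen, rep1, if_neg hp]
        simp

lemma replace_eq_rep1 (s old new : List Char) (hold : old ≠ []) :
    PySem.Chars.replace s old new = rep1 old new s := by
  rw [PySem.Chars.replace, if_neg (by simp [hold]), go_eq_rep1 old new hold s.length s [] le_rfl]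
  simp

-- a pass for `old` neither consumes nor creates a match of q at the front,
-- provided every nonempty tail of q clashes with both `old` and `new`
lemma passPrefix (old new : List Char) (hold : old ≠ []) :
    ∀ n (t : List Char), t.length ≤ n → ∀ q : List Char,
      (∀ q' ∈ q.tails, q' ≠ [] → pvMismatch q' new ∧ pvMismatch q' old) →
      q.isPrefixOf (rep1 old new t) = q.isPrefixOf t := by
  intro n
  induction n with
  | zero =>
    intro t ht q _
    have : t = [] := List.eq_nil_of_length_eq_zero (Nat.le_zero.mp ht)
    subst this; rw [rep1]
  | succ n ih =>
    intro t ht q hq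
    cases t with
    | nil => rw [rep1]
    | cons c t' =>
      rw [rep1]
      by_cases hp : old.isPrefixOf (c :: t') = true
      · rw [if_pos hp]
        cases q with
        | nil => simp [List.isPrefixOf]
        | cons a q' =>
          have hm := hq (a :: q') (by simp [List.mem_tails]) (by simp)
          rw [mismatch_not_prefix hm.1]
          obtain ⟨w, hw⟩ := List.isPrefixOf_iff_prefix.mp hp
          rw [← hw, mismatch_not_prefix hm.2]
      · rw [if_neg hp]
        cases q with
        | nil => simp [List.isPrefixOf]
        | cons a q' =>
          simp only [List.isPrefixOf]
          have hq' : ∀ q'' ∈ q'.tails, q'' ≠ [] → pvMismatch q'' new ∧ pvMismatch q'' old := by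
            intro q'' hmem hne
            apply hq q'' _ hne
            rw [List.mem_tails] at hmem ⊢
            exact hmem.trans (List.suffix_cons a q')
          rw [ih t' (by simp at ht; omega) q' hq']

-- a pass for `old` walks unchanged over a block L none of whose tails can
-- start a match of `old`
lemma passAppend (old new : List Char) :
    ∀ L : List Char, (∀ L' ∈ L.tails, L' ≠ [] → pvMismatch old L') →
      ∀ w, rep1 old new (L ++ w) = L ++ rep1 old new w := by
  intro L
  induction L with
  | nil => intro _ w; simp
  | cons c L' ih =>
    intro h w
    have hm := h (c :: L') (by simp [List.mem_tails]) (by simp)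
    have hnp : old.isPrefixOf (c :: (L' ++ w)) = false := by
      simpa using mismatch_not_prefix hm w
    rw [List.cons_append, rep1, hnp]
    simp only [Bool.false_eq_true, if_false]
    rw [ih (by
      intro L'' hmem hne
      apply h L'' _ hne
      rw [List.mem_tails] at hmem ⊢
      exact hmem.trans (List.suffix_cons c L')) w]
    simp

lemma rep1_match (old new w : List Char) (hold : old ≠ []) :
    rep1 old new (old ++ w) = new ++ rep1 old new w := by
  cases old with
  | nil => exact absurd rfl hold
  | cons a os =>
    rw [List.cons_append, rep1, if_pos (List.isPrefixOf_iff_prefix.mpr ⟨w, by simp⟩)]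
    simp

-- the heart: the three sequential passes equal the one-pass scan
lemma triple_eq_goB :
    ∀ n (s : List Char), s.length ≤ n →
      rep1 "itervalues(".toList "values(".toList
        (rep1 "xrange(".toList "range(".toList
          (rep1 "unicode(".toList "str(".toList s)) = pvGoB s := by
  intro n
  induction n with
  | zero =>
    intro s hs
    have : s = [] := List.eq_nil_of_length_eq_zero (Nat.le_zero.mp hs)
    subst this
    simp [rep1, pvGoB]
  | succ n ih =>
    intro s hs
    cases s with
    | nil => simp [rep1, pvGoB]
    | cons c t =>
      by_cases hu : "unicode(".toList.isPrefixOf (c :: t) = true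
      · -- s = "unicode(" ++ w
        obtain ⟨w, hw⟩ := List.isPrefixOf_iff_prefix.mp hu
        rw [← hw]
        rw [rep1_match _ _ _ (by decide)]
        rw [passAppend "xrange(".toList "range(".toList "str(".toList (by simp only [pvMismatch]; decide)]
        rw [passAppend "itervalues(".toList "values(".toList "str(".toList (by simp only [pvMismatch]; decide)]
        have hwlen : w.length ≤ n := by
          have := congrArg List.length hw
          simp at this hs
          omega
        rw [ih w hwlen]
        have : pvGoB ("unicode(".toList ++ w) = "str(".toList ++ pvGoB w := by
          rw [show ("unicode(".toList ++ w) = 'u' :: ("nicode(".toList ++ w) by simp,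
              pvGoB, if_pos (by
                rw [show ('u' :: ("nicode(".toList ++ w)) = "unicode(".toList ++ w by simp]
                exact List.isPrefixOf_iff_prefix.mpr ⟨w, rfl⟩)]
          simp
        rw [this]
      · by_cases hx : "xrange(".toList.isPrefixOf (c :: t) = true
        · -- s = "xrange(" ++ w
          obtain ⟨w, hw⟩ := List.isPrefixOf_iff_prefix.mp hx
          rw [← hw]
          rw [passAppend "unicode(".toList "str(".toList "xrange(".toList (by simp only [pvMismatch]; decide)]
          rw [rep1_match _ _ _ (by decide)]
          rw [passAppend "itervalues(".toList "values(".toList "range(".toList (by simp only [pvMismatch]; decide)]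
          have hwlen : w.length ≤ n := by
            have := congrArg List.length hw
            simp at this hs
            omega
          rw [ih w hwlen]
          have hgo : pvGoB ("xrange(".toList ++ w) = "range(".toList ++ pvGoB w := by
            rw [show ("xrange(".toList ++ w) = 'x' :: ("range(".toList ++ w) by simp, pvGoB]
            rw [if_neg (by simp [List.isPrefixOf]),
                if_pos (by
                  rw [show ('x' :: ("range(".toList ++ w)) = "xrange(".toList ++ w by simp]
                  exact List.isPrefixOf_iff_prefix.mpr ⟨w, rfl⟩)]
            simp
          rw [hgo]
        · by_cases hi : "itervalues(".toList.isPrefixOf (c :: t) = true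
          · -- s = "itervalues(" ++ w
            obtain ⟨w, hw⟩ := List.isPrefixOf_iff_prefix.mp hi
            rw [← hw]
            rw [passAppend "unicode(".toList "str(".toList "itervalues(".toList (by simp only [pvMismatch]; decide)]
            rw [passAppend "xrange(".toList "range(".toList "itervalues(".toList (by simp only [pvMismatch]; decide)]
            rw [rep1_match _ _ _ (by decide)]
            have hwlen : w.length ≤ n := by
              have := congrArg List.length hw
              simp at this hs
              omega
            rw [ih w hwlen]
            have hgo : pvGoB ("itervalues(".toList ++ w) = "values(".toList ++ pvGoB w := by
              rw [show ("itervalues(".toList ++ w) = 'i' :: ("tervalues(".toList ++ w) by simp,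
                  pvGoB]
              rw [if_neg (by simp [List.isPrefixOf]),
                  if_neg (by simp [List.isPrefixOf]),
                  if_pos (by
                    rw [show ('i' :: ("tervalues(".toList ++ w)) = "itervalues(".toList ++ w by simp]
                    exact List.isPrefixOf_iff_prefix.mpr ⟨w, rfl⟩)]
              simp
            rw [hgo]
          · -- no pattern matches at the front: all passes copy c
            have htlen : t.length ≤ n := by simp at hs; omega
            have h1 : rep1 "unicode(".toList "str(".toList (c :: t) =
                c :: rep1 "unicode(".toList "str(".toList t := by
              rw [rep1, if_neg hu]
            have hx2 : "xrange(".toList.isPrefixOf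
                (c :: rep1 "unicode(".toList "str(".toList t) = false := by
              have : "xrange(".toList.isPrefixOf (c :: rep1 "unicode(".toList "str(".toList t)
                  = ('x' == c && "range(".toList.isPrefixOf (rep1 "unicode(".toList "str(".toList t)) := by
                simp [List.isPrefixOf]
              rw [this, passPrefix "unicode(".toList "str(".toList (by decide) t.length t le_rfl
                "range(".toList (by simp only [pvMismatch]; decide)]
              have : "xrange(".toList.isPrefixOf (c :: t)
                  = ('x' == c && "range(".toList.isPrefixOf t) := by
                simp [List.isPrefixOf]
              rw [← this]
              exact Bool.not_eq_true _ ▸ (eq_false_of_ne_true hx)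
            have h2 : rep1 "xrange(".toList "range(".toList
                (c :: rep1 "unicode(".toList "str(".toList t) =
                c :: rep1 "xrange(".toList "range(".toList
                  (rep1 "unicode(".toList "str(".toList t) := by
              rw [rep1, hx2]; simp
            have hi2 : "itervalues(".toList.isPrefixOf
                (c :: rep1 "xrange(".toList "range(".toList
                  (rep1 "unicode(".toList "str(".toList t)) = false := by
              have e1 : "itervalues(".toList.isPrefixOf
                  (c :: rep1 "xrange(".toList "range(".toList
                    (rep1 "unicode(".toList "str(".toList t))
                  = ('i' == c && "tervalues(".toList.isPrefixOf
                    (rep1 "xrange(".toList "range(".toList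
                      (rep1 "unicode(".toList "str(".toList t))) := by
                simp [List.isPrefixOf]
              rw [e1, passPrefix "xrange(".toList "range(".toList (by decide) _ _ le_rfl
                "tervalues(".toList (by simp only [pvMismatch]; decide),
                passPrefix "unicode(".toList "str(".toList (by decide) t.length t le_rfl
                "tervalues(".toList (by simp only [pvMismatch]; decide)]
              have e2 : "itervalues(".toList.isPrefixOf (c :: t)
                  = ('i' == c && "tervalues(".toList.isPrefixOf t) := by
                simp [List.isPrefixOf]
              rw [← e2]
              exact Bool.not_eq_true _ ▸ (eq_false_of_ne_true hi)
            have h3 : rep1 "itervalues(".toList "values(".toList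
                (c :: rep1 "xrange(".toList "range(".toList
                  (rep1 "unicode(".toList "str(".toList t)) =
                c :: rep1 "itervalues(".toList "values(".toList
                  (rep1 "xrange(".toList "range(".toList
                    (rep1 "unicode(".toList "str(".toList t)) := by
              rw [rep1, hi2]; simp
            rw [h1, h2, h3, ih t htlen, pvGoB, if_neg hu, if_neg hx, if_neg hi]

-- ===== VERDICT (by name: the statement is the Claim_ definition above) =====
theorem patch_syntax_spec : Claim_equal_patch_syntax := by
  intro cs _
  unfold Spec_patch_syntax patch_syntax patch_syntax_alt PySem.Str.replace
  simp only [pv_toList_ofList]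
  rw [replace_eq_rep1 _ _ _ (by decide), replace_eq_rep1 _ _ _ (by decide),
      replace_eq_rep1 _ _ _ (by decide),
      triple_eq_goB cs.toList.length cs.toList le_rfl]
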